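-- pv_equiv track=rewrite | github.com/cyberyesha/iPv6-Transformer | script.py | find_longest_zeros
-- ===== SOURCE A (Python) =====
-- def find_longest_zeros(hex_segments):
--     # Find the start index and length of the longest consecutive zeros in a list of hexadecimal segments.
--     best_start = -1
--     best_length = 0
--     current_start = -1
--     current_length = 0
--
--     for index, segment in enumerate(hex_segments):
--         if segment == '0':
--             current_length += 1
--             if current_start == -1:
--                 current_start = index
--             if current_length > best_length:
--                 best_length = current_length
--                 best_start = current_start
--         else:
--             current_length = 0
--             current_start = -1
--
--     return best_start, best_length
-- ===== SOURCE B (Python) =====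
-- def find_longest_zeros(hex_segments):
--     # Build the list of maximal zero-runs as (start, length) pairs, then select
--     # the longest one (earliest on ties); (-1, 0) if there are no zero runs.
--     runs = []
--     start = None
--     for i, seg in enumerate(hex_segments):
--         if seg == '0':
--             if start is None:
--                 start = i
--         else:
--             if start is not None:
--                 runs.append((start, i - start))
--                 start = None
--     if start is not None:
--         runs.append((start, len(hex_segments) - start))
--
--     best = (-1, 0)
--     for run in runs:
--         if run[1] > best[1]:
--             best = run
--     return best
-- ===== Notes on version B (the rewrite author's own statement) =====
-- stated objective: alternative
-- what changed: B replaces A's single fused scan with four inline state variables by a build-then-select decomposition: one pass collects all maximal zero-runs as (start, length) pairs, a second pass picks the longest run (earliest on strict-> ties), defaulting to (-1, 0).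
import Mathlib
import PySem

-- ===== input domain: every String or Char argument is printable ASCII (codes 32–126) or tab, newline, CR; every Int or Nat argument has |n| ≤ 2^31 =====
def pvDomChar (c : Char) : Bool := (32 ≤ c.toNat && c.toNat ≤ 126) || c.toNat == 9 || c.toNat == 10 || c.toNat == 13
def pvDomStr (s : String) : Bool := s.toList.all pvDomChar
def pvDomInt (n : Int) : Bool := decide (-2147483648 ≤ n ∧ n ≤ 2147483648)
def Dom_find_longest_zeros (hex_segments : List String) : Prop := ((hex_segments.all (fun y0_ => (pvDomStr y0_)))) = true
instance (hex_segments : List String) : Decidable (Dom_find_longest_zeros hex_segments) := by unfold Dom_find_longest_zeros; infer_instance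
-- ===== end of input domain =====

-- ===== PORT A =====
-- B changes the decomposition only: one pass builds the zero-runs, a second selects the longest (same cost).
def find_longest_zeros (hex_segments : List String) : Int × Int :=
  let st :=
    (PySem.List.enumerate hex_segments).foldl
      (fun (st : Int × Int × Int × Int) (p : Int × String) =>
        let bs := st.1; let bl := st.2.1; let cs := st.2.2.1; let cl := st.2.2.2
        let index := p.1; let segment := p.2
        if segment = "0" then
          let cl := cl + 1
          let cs := if cs = -1 then index else cs
          if cl > bl then (cs, cl, cs, cl) else (bs, bl, cs, cl)
        else (bs, bl, -1, 0))
      (-1, 0, -1, 0)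
  (st.1, st.2.1)

-- ===== PORT B =====
-- the first pass of Source B: collect maximal zero-runs as (start, length), scanning with the running index
def pvZeroRuns : List String → Int → Option Int → List (Int × Int)
  | [], _, none => []
  | [], i, some s => [(s, i - s)]
  | seg :: rest, i, none =>
      if seg = "0" then pvZeroRuns rest (i + 1) (some i) else pvZeroRuns rest (i + 1) none
  | seg :: rest, i, some s =>
      if seg = "0" then pvZeroRuns rest (i + 1) (some s)
      else (s, i - s) :: pvZeroRuns rest (i + 1) none

-- the second pass of Source B: pick the longest run, earliest wins ties (strict >)
def pvSelectBest (b : Int × Int) (runs : List (Int × Int)) : Int × Int :=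
  runs.foldl (fun b run => if run.2 > b.2 then run else b) b

def find_longest_zeros_alt (hex_segments : List String) : Int × Int :=
  pvSelectBest (-1, 0) (pvZeroRuns hex_segments 0 none)

-- ===== PRECONDITION & SPEC =====
def Spec_find_longest_zeros (hex_segments : List String) (out : Int × Int) : Prop := out = find_longest_zeros_alt hex_segments
instance (hex_segments : List String) (out : Int × Int) : Decidable (Spec_find_longest_zeros hex_segments out) := by unfold Spec_find_longest_zeros; infer_instance

-- ===== CLAIM (what is proved, stated in full; the proofs are below) =====
def Claim_equal_find_longest_zeros : Prop := ∀ (hex_segments : List String), Dom_find_longest_zeros hex_segments → Spec_find_longest_zeros hex_segments (find_longest_zeros hex_segments)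

-- ===== LEMMAS AND PROOFS =====
def pvStepA (st : Int × Int × Int × Int) (p : Int × String) : Int × Int × Int × Int :=
  let bs := st.1; let bl := st.2.1; let cs := st.2.2.1; let cl := st.2.2.2
  let index := p.1; let segment := p.2
  if segment = "0" then
    let cl := cl + 1
    let cs := if cs = -1 then index else cs
    if cl > bl then (cs, cl, cs, cl) else (bs, bl, cs, cl)
  else (bs, bl, -1, 0)

def pvBestUpd (b run : Int × Int) : Int × Int := if run.2 > b.2 then run else b

def pvStateOf (b : Int × Int) (st : Option Int) (i : Int) : Int × Int × Int × Int :=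
  match st with
  | none => (b.1, b.2, -1, 0)
  | some s => let b' := pvBestUpd b (s, i - s); (b'.1, b'.2, s, i - s)

theorem pvSelectBest_cons (b : Int × Int) (r : Int × Int) (rs : List (Int × Int)) :
    pvSelectBest b (r :: rs) = pvSelectBest (pvBestUpd b r) rs := by
  simp [pvSelectBest, pvBestUpd, List.foldl]

theorem pvBestUpd_step (b : Int × Int) (s cl : Int) :
    pvBestUpd (pvBestUpd b (s, cl)) (s, cl + 1) = pvBestUpd b (s, cl + 1) := by
  by_cases hc : cl > b.2
  · simp only [pvBestUpd, if_pos hc]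
    have h1 : ((s, cl + 1) : Int × Int).2 > ((s, cl) : Int × Int).2 := by simp
    have h2 : ((s, cl + 1) : Int × Int).2 > b.2 := by simp; omega
    rw [if_pos h1, if_pos h2]
  · simp only [pvBestUpd, if_neg hc]

theorem pvStep_zero (x y s cl i : Int) (hs : ¬ (s = -1)) (seg : String) (hz : seg = "0") :
    pvStepA (x, y, s, cl) (i, seg) =
      ((pvBestUpd (x, y) (s, cl + 1)).1, (pvBestUpd (x, y) (s, cl + 1)).2, s, cl + 1) := by
  simp only [pvStepA, pvBestUpd, hz, if_pos, hs, if_false]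
  split_ifs <;> rfl

theorem pvStep_zero_start (x y i : Int) (seg : String) (hz : seg = "0") :
    pvStepA (x, y, -1, 0) (i, seg) =
      ((pvBestUpd (x, y) (i, 1)).1, (pvBestUpd (x, y) (i, 1)).2, i, 1) := by
  simp only [pvStepA, pvBestUpd, hz, if_pos]
  norm_num
  split_ifs <;> simp_all

theorem pvMain (rest : List String) : ∀ (i : Int) (b : Int × Int) (st : Option Int),
    0 ≤ i → (∀ s, st = some s → 0 ≤ s ∧ s < i) →
    (let f := (PySem.List.enumerate rest i).foldl pvStepA (pvStateOf b st i)
     (f.1, f.2.1)) = pvSelectBest b (pvZeroRuns rest i st) := by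
  induction rest with
  | nil =>
    intro i b st hi hst
    cases st with
    | none => simp [PySem.List.enumerate_nil, pvZeroRuns, pvSelectBest, pvStateOf]
    | some s =>
      simp only [PySem.List.enumerate_nil, List.foldl, pvZeroRuns, pvStateOf,
        pvSelectBest, List.foldl_nil]
      rcases h : pvBestUpd b (s, i - s) with ⟨x, y⟩
      simp [pvBestUpd] at h
      exact h.symm
  | cons seg rest ih =>
    intro i b st hi hst
    rw [PySem.List.enumerate_cons, List.foldl_cons]
    cases st with
    | none =>
      by_cases hz : seg = "0"
      · have hkey : pvStepA (pvStateOf b none i) (i, seg) = pvStateOf b (some i) (i + 1) := by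
          rw [pvStateOf]
          rw [pvStep_zero_start b.1 b.2 i seg hz]
          have e : i + 1 - i = 1 := by ring
          simp only [pvStateOf, e]
        rw [hkey]
        simp only [pvZeroRuns, hz, if_pos]
        exact ih (i + 1) b (some i) (by omega) (by intro s hs; cases hs; omega)
      · have hkey : pvStepA (pvStateOf b none i) (i, seg) = pvStateOf b none (i + 1) := by
          simp [pvStepA, pvStateOf, hz]
        rw [hkey]
        simp only [pvZeroRuns, hz, if_false]
        exact ih (i + 1) b none (by omega) (by intro s hs; cases hs)
    | some s =>
      obtain ⟨hs0, hsi⟩ := hst s rfl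
      by_cases hz : seg = "0"
      · have hkey : pvStepA (pvStateOf b (some s) i) (i, seg) = pvStateOf b (some s) (i + 1) := by
          rcases hb : pvBestUpd b (s, i - s) with ⟨x, y⟩
          have key := pvBestUpd_step b s (i - s)
          rw [hb] at key
          have e : i - s + 1 = i + 1 - s := by ring
          rw [e] at key
          simp only [pvStateOf, hb]
          rw [pvStep_zero x y s (i - s) i (by omega) seg hz, e, key]
        rw [hkey]
        simp only [pvZeroRuns, hz, if_pos]
        exact ih (i + 1) b (some s) (by omega) (by intro t ht; cases ht; omega)
      · have hkey : pvStepA (pvStateOf b (some s) i) (i, seg) =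
            pvStateOf (pvBestUpd b (s, i - s)) none (i + 1) := by
          rcases h : pvBestUpd b (s, i - s) with ⟨x, y⟩
          simp [pvStepA, pvStateOf, hz, h]
        rw [hkey]
        simp only [pvZeroRuns, hz, if_false, pvSelectBest_cons]
        exact ih (i + 1) (pvBestUpd b (s, i - s)) none (by omega) (by intro t ht; cases ht)

-- ===== VERDICT (by name: the statement is the Claim_ definition above) =====
theorem find_longest_zeros_spec : Claim_equal_find_longest_zeros := by
  intro xs _
  unfold Spec_find_longest_zeros find_longest_zeros find_longest_zeros_alt
  have h := pvMain xs 0 (-1, 0) none (le_refl 0) (by intro s hs; cases hs)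
  simp only [pvStateOf] at h
  rw [← h]
  rfl
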